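-- pv_equiv track=rewrite | github.com/patscho/aoc2015 | day01/main.py | in_basement
-- ===== SOURCE A (Python) =====
-- def what_floor(brackets):
--     opening_brackets = brackets.count("(")
--     closing_brackets = brackets.count(")")
--     floor = opening_brackets - closing_brackets
--     return floor
--
-- def in_basement(brackets: str) -> int:
--     pos = 1
--     for i in range(pos, len(brackets) + 1):
--         slice = brackets[:i]
--         if what_floor(slice) == -1:
--             pos = i
--             break
--         pos = i
--     return pos
-- ===== SOURCE B (Python) =====
-- def in_basement(brackets: str) -> int:
--     floor = 0
--     i = 0
--     for c in brackets:
--         i += 1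
--         floor += (c == "(") - (c == ")")
--         if floor == -1:
--             return i
--     return i
-- ===== Notes on version B (the rewrite author's own statement) =====
-- stated objective: faster
-- what changed: A recomputes the floor of every prefix from scratch with two string.count scans per index; B keeps one running floor counter in a single pass and returns the first 1-based index where it hits -1 (the scan length if it never does).
-- intended difference: On the empty string A returns 1 (its untouched loop-seed pos=1, a position that does not exist), while B returns 0, consistent with A's own no-basement fallback of returning the scanned length; B's value is the intended one. — e.g. on in_basement(""): A returns 1, B returns 0
import Mathlib
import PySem

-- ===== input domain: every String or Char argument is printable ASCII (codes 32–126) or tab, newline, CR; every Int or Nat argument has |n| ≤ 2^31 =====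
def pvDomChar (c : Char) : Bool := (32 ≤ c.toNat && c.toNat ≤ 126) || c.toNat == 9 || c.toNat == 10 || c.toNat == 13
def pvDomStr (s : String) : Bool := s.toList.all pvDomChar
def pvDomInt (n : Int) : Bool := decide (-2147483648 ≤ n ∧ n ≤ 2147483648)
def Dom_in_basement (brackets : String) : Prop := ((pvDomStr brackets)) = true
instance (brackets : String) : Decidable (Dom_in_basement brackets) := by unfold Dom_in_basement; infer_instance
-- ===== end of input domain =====

-- B replaces A's per-prefix rescans (two .count passes per index) with one running floor counter; on the empty string B returns 0 (the scanned length) where A returns its leftover seed 1.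

-- ===== PORT A =====
def what_floor (brackets : String) : Int :=
  let opening_brackets : Int := (PySem.Str.count brackets "(" : Int)
  let closing_brackets : Int := (PySem.Str.count brackets ")" : Int)
  opening_brackets - closing_brackets

-- the 'for i in range(pos, len(brackets)+1)' loop with its break; pos is the carried state
def inBasementLoop (brackets : String) : List Int → Int → Int
  | [], pos => pos
  | i :: rest, _pos =>
    let sl := PySem.Str.slice brackets none (some i)
    if what_floor sl = -1 then i else inBasementLoop brackets rest i

def in_basement (brackets : String) : Int :=
  inBasementLoop brackets (PySem.List.pyRange 1 (PySem.Str.len brackets + 1) 1) 1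

-- ===== PORT B =====
-- single pass: i counts characters (1-based), floor is the running counter
def inBasementAltGo : List Char → Int → Int → Int
  | [], i, _floor => i
  | c :: rest, i, floor =>
    let i' := i + 1
    let floor' := floor + (if c = '(' then (1 : Int) else 0) - (if c = ')' then (1 : Int) else 0)
    if floor' = -1 then i' else inBasementAltGo rest i' floor'

def in_basement_alt (brackets : String) : Int :=
  inBasementAltGo brackets.toList 0 0

-- ===== PRECONDITION & SPEC =====
-- On the empty string A returns 1 (its untouched loop-seed pos=1, a position that does not exist),
-- while B returns 0, consistent with A's own no-basement fallback of returning the scanned length.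
def D_in_basement (brackets : String) : Prop := brackets = ""
instance (brackets : String) : Decidable (D_in_basement brackets) := by unfold D_in_basement; infer_instance

def Spec_in_basement (brackets : String) (out : Int) : Prop := ¬ D_in_basement brackets → out = in_basement_alt brackets
instance (brackets : String) (out : Int) : Decidable (Spec_in_basement brackets out) := by unfold Spec_in_basement; infer_instance

def pvDiffWitness_in_basement : String := ""
def pvDiffWitnessOut_in_basement : Int × Int := (1, 0)

-- ===== CLAIM (what is proved, stated in full; the proofs are below) =====
def Claim_unchanged_in_basement : Prop := ∀ (brackets : String), Dom_in_basement brackets → Spec_in_basement brackets (in_basement brackets)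
def Claim_changed_in_basement : Prop := Dom_in_basement (pvDiffWitness_in_basement) ∧ D_in_basement (pvDiffWitness_in_basement) ∧ in_basement (pvDiffWitness_in_basement) = pvDiffWitnessOut_in_basement.1 ∧ in_basement_alt (pvDiffWitness_in_basement) = pvDiffWitnessOut_in_basement.2 ∧ pvDiffWitnessOut_in_basement.1 ≠ pvDiffWitnessOut_in_basement.2
def Claim_exact_in_basement : Prop := ∀ (brackets : String), Dom_in_basement brackets → D_in_basement brackets → in_basement brackets ≠ in_basement_alt brackets

-- ===== LEMMAS AND PROOFS =====

-- Python's str.count for a single-character needle is the character count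
lemma countGo_singleton (c : Char) : ∀ (l : List Char) (fuel acc : Nat), l.length ≤ fuel →
    PySem.Chars.count.go [c] fuel l acc = acc + l.count c := by
  intro l
  induction l with
  | nil => intro fuel acc _; cases fuel <;> simp [PySem.Chars.count.go]
  | cons x t ih =>
    intro fuel acc h
    cases fuel with
    | zero => simp at h
    | succ f =>
      simp only [PySem.Chars.count.go]
      by_cases hx : x = c
      · subst hx
        simp only [List.isPrefixOf, BEq.rfl, Bool.true_and, if_true, List.length_cons,
          List.drop_succ_cons, List.length_nil, List.drop_zero]
        rw [ih f (acc + 1) (by simpa using h)]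
        simp
        omega
      · have : ([c].isPrefixOf (x :: t)) = false := by
          simp [List.isPrefixOf]
          exact fun h' => absurd h'.symm hx
        rw [this]
        simp only [Bool.false_eq_true, if_false]
        rw [ih f acc (by simpa using h)]
        simp [hx]

lemma count_singleton (l : List Char) (c : Char) : PySem.Chars.count l [c] = l.count c := by
  have h := countGo_singleton c l l.length 0 le_rfl
  simp [PySem.Chars.count, h]

-- the floor of a character list
def floorK (l : List Char) : Int := (l.count '(' : Int) - (l.count ')' : Int)

lemma what_floor_eq (s : String) : what_floor s = floorK s.toList := by
  simp [what_floor, floorK, PySem.Str.count_eq, count_singleton]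

lemma floorK_append_singleton (l : List Char) (c : Char) :
    floorK (l ++ [c]) = floorK l + (if c = '(' then (1 : Int) else 0) - (if c = ')' then (1 : Int) else 0) := by
  simp [floorK, List.count_append, List.count_singleton]
  by_cases h1 : c = '(' <;> by_cases h2 : c = ')' <;> simp [h1, h2] <;> omega

-- main loop invariant: A's remaining index scan over pre ++ rest agrees with B's scan of rest
lemma loop_invariant : ∀ (rest pre : List Char) (pos : Int),
    (pos = (pre.length : Int) ∨ rest ≠ []) →
    inBasementLoop (String.ofList (pre ++ rest))
        (PySem.List.pyRange ((pre.length : Int) + 1) (((pre ++ rest).length : Int) + 1) 1) pos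
      = inBasementAltGo rest (pre.length : Int) (floorK pre) := by
  intro rest
  induction rest with
  | nil =>
    intro pre pos h
    rcases h with h | h
    · simp [PySem.List.pyRange_one_eq_nil, inBasementLoop, inBasementAltGo, h]
    · exact absurd rfl h
  | cons c t ih =>
    intro pre pos _h
    have hlt : (pre.length : Int) + 1 < ((pre ++ c :: t).length : Int) + 1 := by
      simp
    rw [PySem.List.pyRange_one_cons hlt]
    simp only [inBasementLoop]
    have hslice : (PySem.Str.slice (String.ofList (pre ++ c :: t)) none (some ((pre.length : Int) + 1))).toList
        = pre ++ [c] := by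
      have : ((pre.length : Int) + 1) = ((pre.length + 1 : Nat) : Int) := by push_cast; ring
      rw [PySem.Str.toList_slice, PySem.Chars.slice_eq_listSlice, this,
        PySem.List.slice_to_natCast]
      simp [List.take_append]
    have hwf : what_floor (PySem.Str.slice (String.ofList (pre ++ c :: t)) none (some ((pre.length : Int) + 1)))
        = floorK pre + (if c = '(' then (1 : Int) else 0) - (if c = ')' then (1 : Int) else 0) := by
      rw [what_floor_eq, hslice, floorK_append_singleton]
    simp only [inBasementAltGo]
    rw [hwf]
    by_cases hc : floorK pre + (if c = '(' then (1 : Int) else 0) - (if c = ')' then (1 : Int) else 0) = -1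
    · simp [hc]
    · simp only [hc, if_false]
      have := ih (pre ++ [c]) ((pre.length : Int) + 1)
        (Or.inl (by simp))
      rw [floorK_append_singleton] at this
      have harr : pre ++ [c] ++ t = pre ++ c :: t := by simp
      rw [harr] at this
      have hlen : ((pre ++ [c]).length : Int) = (pre.length : Int) + 1 := by simp
      rw [hlen] at this
      exact this

-- ===== VERDICT (by name: the statement is the Claim_ definition above) =====
theorem in_basement_spec : Claim_unchanged_in_basement := by
  intro brackets _hdom hD
  have hne : brackets.toList ≠ [] := fun h => hD (String.toList_eq_nil_iff.mp h)
  have := loop_invariant brackets.toList [] 1 (Or.inr hne)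
  simp only [List.nil_append, List.length_nil, Nat.cast_zero, zero_add,
    String.ofList_toList] at this
  unfold in_basement in_basement_alt
  rw [PySem.Str.len_eq, this]
  rfl

theorem in_basement_changed : Claim_changed_in_basement := by
  unfold Claim_changed_in_basement; decide

theorem in_basement_tight : Claim_exact_in_basement := by
  intro brackets _hdom hD
  unfold D_in_basement at hD
  subst hD
  decide
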